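-- pv_equiv track=rewrite | github.com/N5GEH/n5geh.services.grid_protection | docker/cloud_setup/opc_ua/client/OPCClient_DataHandler.py | format_textfile
-- ===== SOURCE A (Python) =====
-- def format_textfile(mlist):
--     result = []
--     for i in mlist:
--         a = i.replace('\t', ' ')
--         b = a.replace('\n', ' ')
--         c = b.replace(',0', ' ')
--         d = c.replace(',', ' ')
--         result.append(d)
--     return result
-- ===== SOURCE B (Python) =====
-- def _collapse(s):
--     buf = []
--     i = 0
--     n = len(s)
--     while i < n:
--         c = s[i]
--         if c == ',' and i + 1 < n and s[i + 1] == '0':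
--             buf.append(' ')
--             i += 2
--         elif c in '\t\n,':
--             buf.append(' ')
--             i += 1
--         else:
--             buf.append(c)
--             i += 1
--     return ''.join(buf)
--
--
-- def format_textfile(mlist):
--     return [_collapse(s) for s in mlist]
-- ===== Notes on version B (the rewrite author's own statement) =====
-- stated objective: alternative
-- what changed: Replaces the four chained full-string str.replace scans with one single left-to-right character sweep with one-char lookahead (',0' preferred over ','), building each output string in a single pass.
import Mathlib
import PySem

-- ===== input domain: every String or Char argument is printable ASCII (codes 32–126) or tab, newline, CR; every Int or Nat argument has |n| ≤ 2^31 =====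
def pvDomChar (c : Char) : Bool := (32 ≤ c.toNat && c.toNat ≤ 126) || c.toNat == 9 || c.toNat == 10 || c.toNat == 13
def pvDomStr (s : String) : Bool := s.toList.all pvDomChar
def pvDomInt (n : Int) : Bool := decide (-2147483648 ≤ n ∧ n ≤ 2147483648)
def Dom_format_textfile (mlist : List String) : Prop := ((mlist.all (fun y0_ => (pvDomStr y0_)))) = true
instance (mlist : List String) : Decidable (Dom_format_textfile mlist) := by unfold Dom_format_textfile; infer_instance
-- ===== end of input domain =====

-- B replaces A's four chained full-string str.replace scans by one single left-to-right
-- character sweep with one-char lookahead (',0' preferred over ','); same output, one pass.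

-- ===== PORT A =====
def format_textfile (mlist : List String) : List String :=
  mlist.foldl (fun result i =>
    let a := PySem.Str.replace i "\t" " "
    let b := PySem.Str.replace a "\n" " "
    let c := PySem.Str.replace b ",0" " "
    let d := PySem.Str.replace c "," " "
    result ++ [d]) []

-- ===== PORT B =====
-- single pass over the characters: ',' followed by '0' → one ' ' (skip both);
-- '\t' / '\n' / ',' → ' '; anything else kept
def pvSweep : List Char → List Char
  | [] => []
  | c :: t =>
    if c = ',' ∧ t.head? = some '0' then ' ' :: pvSweep t.tail
    else if c = '\t' ∨ c = '\n' ∨ c = ',' then ' ' :: pvSweep t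
    else c :: pvSweep t
  termination_by l => l.length
  decreasing_by all_goals simp [List.length_tail]

def format_textfile_alt (mlist : List String) : List String :=
  mlist.map (fun s => String.ofList (pvSweep s.toList))

-- ===== PRECONDITION & SPEC =====
def Spec_format_textfile (mlist : List String) (out : List String) : Prop := out = format_textfile_alt mlist
instance (mlist : List String) (out : List String) : Decidable (Spec_format_textfile mlist out) := by unfold Spec_format_textfile; infer_instance

-- ===== CLAIM (what is proved, stated in full; the proofs are below) =====
def Claim_equal_format_textfile : Prop := ∀ (mlist : List String), Dom_format_textfile mlist → Spec_format_textfile mlist (format_textfile mlist)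

-- ===== LEMMAS AND PROOFS =====

-- unfold lemmas for the B-side sweep
theorem pvSweep_pos (t : List Char) : pvSweep (',' :: '0' :: t) = ' ' :: pvSweep t := by
  rw [pvSweep]; simp

theorem pvSweep_mid (c : Char) (t : List Char) (h1 : ¬(c = ',' ∧ t.head? = some '0'))
    (h2 : c = '\t' ∨ c = '\n' ∨ c = ',') : pvSweep (c :: t) = ' ' :: pvSweep t := by
  rw [pvSweep]; simp [h1, h2]

theorem pvSweep_other (c : Char) (t : List Char) (h1 : ¬(c = ',' ∧ t.head? = some '0'))
    (h2 : ¬(c = '\t' ∨ c = '\n' ∨ c = ',')) : pvSweep (c :: t) = c :: pvSweep t := by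
  rw [pvSweep]; simp [h1, h2]

-- single-character replace is a map
theorem pv_go_single (a : Char) :
    ∀ (fuel : Nat) (l acc : List Char), l.length ≤ fuel →
      PySem.Chars.replace.go [a] [' '] fuel l acc =
        acc.reverse ++ l.map (fun c => if c = a then ' ' else c) := by
  intro fuel
  induction fuel with
  | zero => intro l acc h; simp at h; subst h; simp [PySem.Chars.replace.go]
  | succ n ih =>
    intro l acc h
    cases l with
    | nil => simp [PySem.Chars.replace.go]
    | cons c t =>
      simp only [List.length_cons] at h
      by_cases hc : c = a
      · subst hc
        have := ih t (' ' :: acc) (by omega)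
        simp [PySem.Chars.replace.go, List.isPrefixOf, this]
      · have := ih t (c :: acc) (by omega)
        simp only [PySem.Chars.replace.go, List.isPrefixOf, this]
        simp only [List.isPrefixOf_nil_left, Bool.and_true, beq_iff_eq]
        rw [if_neg (fun heq => hc (Eq.symm heq))]
        simp [hc]

theorem pv_replace_single (a : Char) (l : List Char) :
    PySem.Chars.replace l [a] [' '] = l.map (fun c => if c = a then ' ' else c) := by
  simp only [PySem.Chars.replace, List.isEmpty_cons, Bool.false_eq_true, if_false]
  exact pv_go_single a l.length l [] le_rfl

-- ',0'-replace characterised as a one-pass recursion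
def pvR2 : List Char → List Char
  | [] => []
  | c :: t =>
    if c = ',' ∧ t.head? = some '0' then ' ' :: pvR2 t.tail
    else c :: pvR2 t
  termination_by l => l.length
  decreasing_by all_goals simp [List.length_tail]

theorem pvR2_pos (t : List Char) : pvR2 (',' :: '0' :: t) = ' ' :: pvR2 t := by
  rw [pvR2]; simp

theorem pvR2_neg (c : Char) (t : List Char) (h : ¬(c = ',' ∧ t.head? = some '0')) :
    pvR2 (c :: t) = c :: pvR2 t := by
  rw [pvR2]; simp [h]

theorem pv_go_pair :
    ∀ (fuel : Nat) (l acc : List Char), l.length ≤ fuel →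
      PySem.Chars.replace.go [',', '0'] [' '] fuel l acc = acc.reverse ++ pvR2 l := by
  intro fuel
  induction fuel with
  | zero => intro l acc h; simp at h; subst h; simp [PySem.Chars.replace.go, pvR2]
  | succ n ih =>
    intro l acc h
    cases l with
    | nil => simp [PySem.Chars.replace.go, pvR2]
    | cons c t =>
      simp only [List.length_cons] at h
      by_cases hp : c = ',' ∧ t.head? = some '0'
      · obtain ⟨hc, ht⟩ := hp
        subst hc
        cases t with
        | nil => simp at ht
        | cons d t' =>
          simp only [List.head?_cons, Option.some.injEq] at ht
          subst ht
          have := ih t' (' ' :: acc) (by simp at h; omega)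
          rw [pvR2_pos]
          simp [PySem.Chars.replace.go, List.isPrefixOf, this]
      · have := ih t (c :: acc) (by omega)
        rw [pvR2_neg c t hp]
        have hnp : ([',', '0'].isPrefixOf (c :: t)) = false := by
          cases t with
          | nil => simp [List.isPrefixOf]
          | cons d t' =>
            simp only [List.isPrefixOf, Bool.and_eq_false_iff, List.isPrefixOf_nil_left,
              Bool.and_eq_true, beq_iff_eq, Bool.and_eq_false_iff, beq_eq_false_iff_ne, ne_eq]
            by_cases hc : c = ','
            · subst hc
              right; left
              intro hd
              exact hp ⟨rfl, by simp [hd.symm]⟩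
            · left; simpa using fun h => hc h.symm
        simp [PySem.Chars.replace.go, hnp, this]

theorem pv_replace_pair (l : List Char) :
    PySem.Chars.replace l [',', '0'] [' '] = pvR2 l := by
  simp only [PySem.Chars.replace, List.isEmpty_cons, Bool.false_eq_true, if_false]
  exact pv_go_pair l.length l [] le_rfl

-- abbreviations used only in the proofs
def pvG (c : Char) : Char := if c = '\n' then ' ' else if c = '\t' then ' ' else c
def pvH (c : Char) : Char := if c = ',' then ' ' else c

theorem pv_head_map_zero (t : List Char) :
    ((t.map pvG).head? = some '0') ↔ (t.head? = some '0') := by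
  cases t with
  | nil => simp
  | cons d t' =>
    simp only [List.map_cons, List.head?_cons, Option.some.injEq]
    constructor
    · intro h
      by_cases hd : d = '0'
      · exact hd
      · exfalso; revert h; simp [pvG]; split_ifs <;> simp_all
    · intro h; subst h; rfl

-- the whole chain equals the single sweep
theorem pv_chain_eq_sweep (l : List Char) :
    (pvR2 (l.map pvG)).map pvH = pvSweep l := by
  induction l using pvSweep.induct with
  | case1 => simp [pvR2, pvSweep]
  | case2 c t h ih =>
    obtain ⟨hc, ht⟩ := h
    subst hc
    cases t with
    | nil => simp at ht
    | cons d t' =>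
      simp only [List.head?_cons, Option.some.injEq] at ht
      subst ht
      simp only [List.tail_cons] at ih
      rw [pvSweep_pos]
      have : pvG ',' = ',' := by decide
      have h0 : pvG '0' = '0' := by decide
      simp only [List.map_cons, this, h0, pvR2_pos, List.map_cons]
      rw [ih]
      simp [pvH]
  | case3 c t h1 h2 ih =>
    rw [pvSweep_mid c t h1 h2]
    have hgc : pvG c = ' ' ∨ pvG c = ',' := by
      rcases h2 with h | h | h <;> simp [pvG, h]
    have hnp : ¬(pvG c = ',' ∧ (t.map pvG).head? = some '0') := by
      rintro ⟨hgc', hh⟩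
      have hc : c = ',' := by
        rcases h2 with h | h | h
        · exfalso; rw [h] at hgc'; exact absurd hgc' (by decide)
        · exfalso; rw [h] at hgc'; exact absurd hgc' (by decide)
        · exact h
      exact h1 ⟨hc, (pv_head_map_zero t).mp hh⟩
    rw [List.map_cons, pvR2_neg _ _ hnp, List.map_cons, ih]
    rcases hgc with h | h <;> rw [h] <;> simp [pvH]
  | case4 c t h1 h2 ih =>
    rw [pvSweep_other c t h1 h2]
    push_neg at h2
    obtain ⟨hct, hcn, hcm⟩ := h2
    have hgc : pvG c = c := by simp [pvG, hct, hcn]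
    have hnp : ¬(c = ',' ∧ (t.map pvG).head? = some '0') := by
      rintro ⟨hgc', hh⟩
      exact h1 ⟨hgc', (pv_head_map_zero t).mp hh⟩
    rw [List.map_cons, hgc, pvR2_neg _ _ hnp, List.map_cons, ih]
    have hc : pvH c = c := by simp [pvH, hcm]
    rw [hc]

theorem pv_elem_eq (s : String) :
    (PySem.Str.replace (PySem.Str.replace (PySem.Str.replace (PySem.Str.replace s "\t" " ")
      "\n" " ") ",0" " ") "," " ") = String.ofList (pvSweep s.toList) := by
  simp only [PySem.Str.replace]
  refine congrArg String.ofList ?_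
  have h1 : ("\t" : String).toList = ['\t'] := rfl
  have h2 : ("\n" : String).toList = ['\n'] := rfl
  have h3 : (",0" : String).toList = [',', '0'] := rfl
  have h4 : ("," : String).toList = [','] := rfl
  have h5 : (" " : String).toList = [' '] := rfl
  rw [h1, h2, h3, h4, h5]
  have hofl : ∀ (l : List Char), (String.ofList l).toList = l := by intro l; simp
  rw [hofl, hofl, hofl]
  rw [pv_replace_single, pv_replace_single, pv_replace_pair, pv_replace_single, List.map_map,
    ← pv_chain_eq_sweep]
  have hg : ((fun c => if c = '\n' then ' ' else c) ∘ fun c => if c = '\t' then ' ' else c) = pvG := by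
    funext c; simp only [Function.comp, pvG]; split_ifs <;> simp_all
  have hh : (fun c => if c = ',' then ' ' else c) = pvH := by
    funext c; simp [pvH]
  rw [hg, hh]

theorem pv_foldl_push (xs acc : List String) :
    xs.foldl (fun result i =>
      let a := PySem.Str.replace i "\t" " "
      let b := PySem.Str.replace a "\n" " "
      let c := PySem.Str.replace b ",0" " "
      let d := PySem.Str.replace c "," " "
      result ++ [d]) acc
    = acc ++ xs.map (fun s => String.ofList (pvSweep s.toList)) := by
  induction xs generalizing acc with
  | nil => simp
  | cons x xs ih =>
    simp only [List.foldl_cons, List.map_cons]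
    rw [ih]
    simp [pv_elem_eq x]

-- ===== VERDICT (by name: the statement is the Claim_ definition above) =====
theorem format_textfile_spec : Claim_equal_format_textfile := by
  intro mlist _
  show format_textfile mlist = format_textfile_alt mlist
  rw [format_textfile, format_textfile_alt, pv_foldl_push, List.nil_append]
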